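-- pv_equiv track=rewrite | github.com/haesol1013/CP1 | cnu_judge/cj_0998_BF.py | triangular_walk
-- ===== SOURCE A (Python) =====
-- def triangular_walk(walk: int) -> tuple:
--     i = 2
--     num = [1]
--     while num[-1] < walk:
--         num.append(num[-1] + i)
--         i += 1
--
--     pos = [0, 1]
--     pos_list = []
--     up = True
--
--     for i in range(0, len(num)):
--         if up:
--             pos[0] += 1
--             pos_list.append(tuple(pos))
--             for j in range(0, i):
--                 pos[0] -= 1
--                 pos[1] += 1
--                 pos_list.append(tuple(pos))
--             up = False
--         else:
--             pos[1] += 1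
--             pos_list.append(tuple(pos))
--             for j in range(0, i):
--                 pos[0] += 1
--                 pos[1] -= 1
--                 pos_list.append(tuple(pos))
--             up = True
--
--     return pos_list[walk-1]
-- ===== SOURCE B (Python) =====
-- def triangular_walk(walk: int) -> tuple:
--     # Locate the diagonal segment k containing step `walk`, then compute the
--     # coordinate directly from the offset inside that segment (no position list).
--     k, t = 1, 1
--     while t < walk:
--         k += 1
--         t += k
--     d = t - walk
--     if k % 2 == 1:
--         return (1 + d, k - d)
--     else:
--         return (k - d, 1 + d)
-- ===== Notes on version B (the rewrite author's own statement) =====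
-- stated objective: faster
-- what changed: B finds the diagonal segment containing the step with a running triangular sum and computes the coordinate in closed form from the offset, instead of materialising the whole zigzag position list and indexing into it; Pre_ excludes walk <= 0, where A raises IndexError or (at walk = 0) returns the last list entry by negative-index wraparound.
-- outside the precondition, e.g. on triangular_walk(0): A returns (1, 1), B returns (2, 0)
import Mathlib
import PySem

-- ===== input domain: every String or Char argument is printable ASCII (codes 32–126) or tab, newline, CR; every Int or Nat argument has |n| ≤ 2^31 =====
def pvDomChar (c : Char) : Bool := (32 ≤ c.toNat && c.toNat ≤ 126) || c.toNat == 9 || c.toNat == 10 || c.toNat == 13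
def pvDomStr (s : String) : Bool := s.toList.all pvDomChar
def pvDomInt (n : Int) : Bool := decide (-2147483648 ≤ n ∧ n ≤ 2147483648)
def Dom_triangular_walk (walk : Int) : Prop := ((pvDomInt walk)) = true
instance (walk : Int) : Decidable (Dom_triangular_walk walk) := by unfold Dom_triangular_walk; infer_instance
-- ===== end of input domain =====

-- B replaces A's materialised zigzag position list by locating the containing diagonal
-- with a running triangular sum and computing the coordinate from the offset (objective: faster).

-- ===== PORT A =====
-- while num[-1] < walk: num.append(num[-1] + i); i += 1
-- `last` carries num[-1] alongside the list (num is always nonempty).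
-- The `2 ≤ i` conjunct is a totality guard only: every reachable call has i ≥ 2.
def twNumLoop (walk i last : Int) (num : List Int) : List Int :=
  if _h : last < walk ∧ 2 ≤ i then twNumLoop walk (i + 1) (last + i) (num ++ [last + i])
  else num
termination_by (walk - last).toNat
decreasing_by omega

-- inner `for j in range(0, i)` body of the up branch: pos[0] -= 1; pos[1] += 1; append
def twInnerUp (s : Int × Int × List (List Int)) (_ : Nat) : Int × Int × List (List Int) :=
  (s.1 - 1, s.2.1 + 1, s.2.2 ++ [[s.1 - 1, s.2.1 + 1]])

-- inner `for j in range(0, i)` body of the down branch: pos[0] += 1; pos[1] -= 1; append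
def twInnerDown (s : Int × Int × List (List Int)) (_ : Nat) : Int × Int × List (List Int) :=
  (s.1 + 1, s.2.1 - 1, s.2.2 ++ [[s.1 + 1, s.2.1 - 1]])

-- one iteration of `for i in range(0, len(num))`; state = (pos[0], pos[1], pos_list, up)
def twSeg (st : Int × Int × List (List Int) × Bool) (i : Nat) : Int × Int × List (List Int) × Bool :=
  if st.2.2.2 then
    let x := st.1 + 1
    let r := (List.range i).foldl twInnerUp (x, st.2.1, st.2.2.1 ++ [[x, st.2.1]])
    (r.1, r.2.1, r.2.2, false)
  else
    let y := st.2.1 + 1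
    let r := (List.range i).foldl twInnerDown (st.1, y, st.2.2.1 ++ [[st.1, y]])
    (r.1, r.2.1, r.2.2, true)

def triangular_walk (walk : Int) : List Int :=
  let num := twNumLoop walk 2 1 [1]
  let r := (List.range num.length).foldl twSeg (0, 1, ([] : List (List Int)), true)
  -- pos_list[walk-1]; pyGet? = none is Python's IndexError, excluded by Pre_
  (PySem.List.pyGet? r.2.2.1 (walk - 1)).getD []

-- ===== PORT B =====
-- while t < walk: k += 1; t += k   (k, t stay positive, so carried as Nat)
def twFind (walk : Int) (k t : Nat) : Nat × Nat :=
  if (t : Int) < walk then twFind walk (k + 1) (t + (k + 1)) else (k, t)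
termination_by (walk - t).toNat
decreasing_by omega

def triangular_walk_alt (walk : Int) : List Int :=
  let r := twFind walk 1 1
  let d : Int := (r.2 : Int) - walk
  if r.1 % 2 = 1 then [1 + d, (r.1 : Int) - d] else [(r.1 : Int) - d, 1 + d]

-- ===== PRECONDITION & SPEC =====
-- Pre_ excludes walk ≤ 0, outside the natural step domain (steps are counted from one):
-- there A raises IndexError (walk < 0) or, at walk = 0, returns the last list entry by
-- negative-index wraparound — an accidental corner no caller would specify.
def Pre_triangular_walk (walk : Int) : Prop := 1 ≤ walk
instance (walk : Int) : Decidable (Pre_triangular_walk walk) := by unfold Pre_triangular_walk; infer_instance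
def pvWitness_triangular_walk : Int := 5

def Spec_triangular_walk (walk : Int) (out : List Int) : Prop := out = triangular_walk_alt walk
instance (walk : Int) (out : List Int) : Decidable (Spec_triangular_walk walk out) := by unfold Spec_triangular_walk; infer_instance

-- ===== CLAIM (what is proved, stated in full; the proofs are below) =====
def Claim_equal_triangular_walk : Prop := ∀ (walk : Int), Dom_triangular_walk walk → Pre_triangular_walk walk → Spec_triangular_walk walk (triangular_walk walk)

-- ===== LEMMAS AND PROOFS =====

theorem mapShift {α : Type} (f : Nat → α) (n : Nat) :
    (List.range (n + 1)).map f = f 0 :: (List.range n).map (fun j => f (j + 1)) := by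
  simp [List.range_succ_eq_map, Function.comp_def]

-- B's loop: invariants carried to the exit of the while loop.
theorem twFind_spec (walk : Int) (k t : Nat) (hk : 1 ≤ k) (ht : 2 * t = k * (k + 1))
    (hlt : (t : Int) - k < walk) :
    1 ≤ (twFind walk k t).1 ∧ 2 * (twFind walk k t).2 = (twFind walk k t).1 * ((twFind walk k t).1 + 1) ∧
      walk ≤ ((twFind walk k t).2 : Int) ∧ ((twFind walk k t).2 : Int) - (twFind walk k t).1 < walk := by
  rw [twFind]
  by_cases h : (t : Int) < walk
  · rw [if_pos h]
    exact twFind_spec walk (k + 1) (t + (k + 1)) (by omega) (by nlinarith [ht]) (by push_cast; omega)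
  · rw [if_neg h]
    exact ⟨hk, ht, by omega, hlt⟩
termination_by (walk - t).toNat
decreasing_by omega

-- Lockstep: A's num-building loop produces a list of length (twFind walk k t).1.
theorem twNumLoop_len (walk : Int) (k t : Nat) (num : List Int) (hn : num.length = k)
    (hk : 1 ≤ k) :
    (twNumLoop walk ((k : Int) + 1) (t : Int) num).length = (twFind walk k t).1 := by
  rw [twNumLoop, twFind]
  by_cases h : (t : Int) < walk
  · rw [dif_pos ⟨h, by omega⟩, if_pos h]
    have := twNumLoop_len walk (k + 1) (t + (k + 1)) (num ++ [(t : Int) + ((k : Int) + 1)])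
      (by simp [hn]) (by omega)
    push_cast at this ⊢
    convert this using 3
  · rw [dif_neg (by omega), if_neg h]
    exact hn
termination_by (walk - t).toNat
decreasing_by omega

-- the positions appended by segment i of A's zigzag
def twSegSpec (i : Nat) : List (List Int) :=
  if i % 2 = 0 then (List.range (i + 1)).map (fun (j : Nat) => [(i : Int) + 1 - j, 1 + (j : Int)])
  else (List.range (i + 1)).map (fun (j : Nat) => [1 + (j : Int), (i : Int) + 1 - j])

-- pos_list after the first L segments
def twZig : Nat → List (List Int)
  | 0 => []
  | L + 1 => twZig L ++ twSegSpec L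

theorem twSegSpec_len (i : Nat) : (twSegSpec i).length = i + 1 := by
  unfold twSegSpec; split <;> simp

theorem twZig_len (L : Nat) : 2 * (twZig L).length = L * (L + 1) := by
  induction L with
  | zero => simp [twZig]
  | succ L ih => simp [twZig, twSegSpec_len]; ring_nf; ring_nf at ih; omega

theorem twInnerUp_fold (n : Nat) (x y : Int) (acc : List (List Int)) :
    (List.range n).foldl twInnerUp (x, y, acc) =
      (x - n, y + n, acc ++ (List.range n).map (fun (j : Nat) => [x - 1 - (j : Int), y + 1 + j])) := by
  induction n with
  | zero => simp
  | succ n ih =>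
    rw [List.range_succ, List.foldl_append, ih]
    simp only [List.foldl_cons, List.foldl_nil, twInnerUp, List.map_append, List.map_cons,
      List.map_nil]
    refine Prod.ext (by push_cast; ring) (Prod.ext (by push_cast; ring) ?_)
    dsimp only
    rw [List.append_assoc]
    refine congrArg _ (congrArg _ (List.cons_eq_cons.mpr ⟨?_, rfl⟩))
    refine List.cons_eq_cons.mpr ⟨by push_cast; ring, ?_⟩
    exact List.cons_eq_cons.mpr ⟨by push_cast; ring, rfl⟩

theorem twInnerDown_fold (n : Nat) (x y : Int) (acc : List (List Int)) :
    (List.range n).foldl twInnerDown (x, y, acc) =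
      (x + n, y - n, acc ++ (List.range n).map (fun (j : Nat) => [x + 1 + (j : Int), y - 1 - j])) := by
  induction n with
  | zero => simp
  | succ n ih =>
    rw [List.range_succ, List.foldl_append, ih]
    simp only [List.foldl_cons, List.foldl_nil, twInnerDown, List.map_append, List.map_cons,
      List.map_nil]
    refine Prod.ext (by push_cast; ring) (Prod.ext (by push_cast; ring) ?_)
    dsimp only
    rw [List.append_assoc]
    refine congrArg _ (congrArg _ (List.cons_eq_cons.mpr ⟨?_, rfl⟩))
    refine List.cons_eq_cons.mpr ⟨by push_cast; ring, ?_⟩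
    exact List.cons_eq_cons.mpr ⟨by push_cast; ring, rfl⟩

theorem twSeg_fold (L : Nat) :
    (List.range L).foldl twSeg (0, 1, ([] : List (List Int)), true) =
      ((if L % 2 = 1 then (1 : Int) else (L : Int)),
       (if L % 2 = 1 then (L : Int) else 1), twZig L, decide (L % 2 = 0)) := by
  induction L with
  | zero => simp [twZig]
  | succ L ih =>
    rw [List.range_succ, List.foldl_append, ih]
    have hz : twZig (L + 1) = twZig L ++ twSegSpec L := rfl
    by_cases hL : L % 2 = 1
    · -- down segment
      have hd : decide (L % 2 = 0) = false := by simp [hL]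
      rw [if_pos hL, if_pos hL, hd]
      have h1 : ¬ (L + 1) % 2 = 1 := by omega
      rw [if_neg h1, if_neg h1]
      have hdd : decide ((L + 1) % 2 = 0) = true := by simp; omega
      rw [hdd]
      show twSeg (1, (L : Int), twZig L, false) L = _
      rw [twSeg]
      simp only [Bool.false_eq_true, if_false]
      rw [twInnerDown_fold]
      have hs : twSegSpec L = (List.range (L + 1)).map (fun (j : Nat) => [1 + (j : Int), (L : Int) + 1 - j]) := by
        unfold twSegSpec; rw [if_neg (by omega)]
      refine Prod.ext (by push_cast; ring) (Prod.ext (by push_cast; ring) (Prod.ext ?_ rfl))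
      dsimp only
      rw [hz, hs, List.append_assoc, mapShift, List.singleton_append]
      refine congrArg _ (List.cons_eq_cons.mpr ⟨by norm_num, ?_⟩)
      refine List.map_congr_left (fun j _ => ?_)
      refine List.cons_eq_cons.mpr ⟨by push_cast; ring, ?_⟩
      exact List.cons_eq_cons.mpr ⟨by push_cast; ring, rfl⟩
    · -- up segment
      have h0 : L % 2 = 0 := by omega
      have hd : decide (L % 2 = 0) = true := by simp [h0]
      rw [if_neg hL, if_neg hL, hd]
      have h1 : (L + 1) % 2 = 1 := by omega
      rw [if_pos h1, if_pos h1]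
      have hdd : decide ((L + 1) % 2 = 0) = false := by simp; omega
      rw [hdd]
      show twSeg ((L : Int), 1, twZig L, true) L = _
      rw [twSeg]
      simp only [if_true]
      rw [twInnerUp_fold]
      have hs : twSegSpec L = (List.range (L + 1)).map (fun (j : Nat) => [(L : Int) + 1 - (j : Int), 1 + (j : Int)]) := by
        unfold twSegSpec; rw [if_pos h0]
      refine Prod.ext (by push_cast; ring) (Prod.ext (by push_cast; ring) (Prod.ext ?_ rfl))
      dsimp only
      rw [hz, hs, List.append_assoc, mapShift, List.singleton_append]
      refine congrArg _ (List.cons_eq_cons.mpr ⟨by norm_num, ?_⟩)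
      refine List.map_congr_left (fun j _ => ?_)
      refine List.cons_eq_cons.mpr ⟨by push_cast; ring, ?_⟩
      exact List.cons_eq_cons.mpr ⟨by push_cast; ring, rfl⟩

-- ===== VERDICT (by name: the statement is the Claim_ definition above) =====
theorem triangular_walk_spec : Claim_equal_triangular_walk := by
  intro walk _ hpre
  unfold Spec_triangular_walk triangular_walk triangular_walk_alt
  dsimp only
  have hpre' : 1 ≤ walk := hpre
  have hsp := twFind_spec walk 1 1 (by omega) (by norm_num) (by push_cast; omega)
  have hlen0 := twNumLoop_len walk 1 1 [1] (by simp) (by norm_num)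
  norm_num at hlen0
  obtain ⟨⟨k, t⟩, hft⟩ : ∃ p, twFind walk 1 1 = p := ⟨_, rfl⟩
  rw [hft] at hsp hlen0
  obtain ⟨hk1, hT, hle, hlt⟩ := hsp
  rw [hft, (show (twNumLoop walk 2 1 [1]).length = k from hlen0), twSeg_fold k]
  dsimp only
  obtain ⟨L, rfl⟩ : ∃ L, k = L + 1 := ⟨k - 1, by omega⟩
  have h2t : 2 * t = (L + 1) * (L + 2) :=
    calc 2 * t = (L + 1) * ((L + 1) + 1) := hT
      _ = (L + 1) * (L + 2) := by ring
  have hzlen : 2 * (twZig (L + 1)).length = (L + 1) * (L + 2) := by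
    have := twZig_len (L + 1); omega
  have hzLlen : (twZig L).length = t - (L + 1) := by
    have hzl := twZig_len L
    have h3 : (L + 1) * (L + 2) = L * (L + 1) + 2 * (L + 1) := by ring
    rw [h3, ← hzl] at h2t
    omega
  -- index arithmetic in Nat
  obtain ⟨w, rfl⟩ : ∃ w : Nat, walk = (w : Int) := ⟨walk.toNat, by omega⟩
  have hw1 : 1 ≤ w := by exact_mod_cast hpre'
  have hwle : w ≤ t := by exact_mod_cast hle
  have hwgt : t - (L + 1) < w := by
    have : ((t : Int)) - ((L : Int) + 1) < w := by push_cast at hlt ⊢; omega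
    omega
  have htL : L + 1 ≤ t := by nlinarith [h2t]
  have hsplit : twZig (L + 1) = twZig L ++ twSegSpec L := rfl
  rw [hsplit]
  have hlen2 : (twZig L ++ twSegSpec L).length = t := by
    rw [List.length_append, twSegSpec_len, hzLlen]; omega
  have hwlen : w - 1 < (twZig L ++ twSegSpec L).length := by rw [hlen2]; omega
  have hidx : PySem.List.pyGet? (twZig L ++ twSegSpec L) ((w : Int) - 1) =
      some ((twZig L ++ twSegSpec L)[w - 1]'hwlen) := by
    have h0 : (0 : Int) ≤ (w : Int) - 1 := by omega
    have hlt' : (w : Int) - 1 < ((twZig L ++ twSegSpec L).length : Int) := by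
      rw [hlen2]; omega
    have hcast : ((w : Int) - 1).toNat = w - 1 := by omega
    rw [PySem.List.pyGet?_eq_some_getElem _ h0 hlt']
    simp only [hcast]
  rw [hidx]
  simp only [Option.getD_some]
  have hge : (twZig L).length ≤ w - 1 := by omega
  rw [List.getElem_append_right hge]
  have hoeq : (((w - 1 - (twZig L).length : Nat)) : Int) = (w : Int) - 1 - ((t : Int) - (L + 1)) := by
    rw [hzLlen]; push_cast; omega
  by_cases hpar : (L + 1) % 2 = 1
  · have hLpar : L % 2 = 0 := by omega
    rw [if_pos hpar]
    have hs : twSegSpec L = (List.range (L + 1)).map (fun (j : Nat) => [(L : Int) + 1 - (j : Int), 1 + (j : Int)]) := by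
      unfold twSegSpec; rw [if_pos hLpar]
    simp only [hs, List.getElem_map, List.getElem_range]
    refine List.cons_eq_cons.mpr ⟨?_, ?_⟩
    · rw [hoeq]; push_cast; omega
    · refine List.cons_eq_cons.mpr ⟨?_, rfl⟩
      rw [hoeq]; push_cast; omega
  · have hLpar : L % 2 = 1 := by omega
    rw [if_neg hpar]
    have hs : twSegSpec L = (List.range (L + 1)).map (fun (j : Nat) => [1 + (j : Int), (L : Int) + 1 - j]) := by
      unfold twSegSpec; rw [if_neg (by omega)]
    simp only [hs, List.getElem_map, List.getElem_range]
    refine List.cons_eq_cons.mpr ⟨?_, ?_⟩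
    · rw [hoeq]; push_cast; omega
    · refine List.cons_eq_cons.mpr ⟨?_, rfl⟩
      rw [hoeq]; push_cast; omega
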